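-- pv_equiv track=rewrite | github.com/stebach/AdventOfCode | years/2018/day11/solve_2018_11.py | get_max_power
-- ===== SOURCE A (Python) =====
-- from math import floor
--
-- def power_level(x, y, serial_number):
--     return (floor(((x+10) * y + serial_number) * (x+10) / 100) % 10) - 5
--
-- def get_max_power(serial_number, size = 3):
--     grid = [[power_level(x,y, serial_number) for x in range(300)] for y in range(300)]
--     for y in range(300):
--         for x in range(300):
--             grid[y][x] = grid[y][x] + (grid[y-1][x] if y > 0 else 0) + (grid[y][x-1] if x > 0 else 0) - (grid[y-1][x-1] if x > 0 and y > 0 else 0)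
--
--     if size == 300:
--         return (0,0,0)
--
--     grid2 = [[grid[y][x] - grid[y-size][x] - grid[y][x-size] + grid[y-size][x-size] for x in range(size,300)] for y in range(size, 300)]
--
--     max_power =max([max(x) for x in grid2])
--
--     y = grid2.index([x for x in grid2 if max_power in x][0])
--     x = grid2[y].index(max_power)
--
--     return (x+1,y+1,max_power)
-- ===== SOURCE B (Python) =====
-- from math import floor
--
-- def power_level(x, y, serial_number):
--     return (floor(((x+10) * y + serial_number) * (x+10) / 100) % 10) - 5
--
-- def get_max_power(serial_number, size=3):
--     if size == 300:
--         return (0, 0, 0)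
--     width = 300 - size
--     # horizontal window sums per row via 1D prefix sums (no 2D summed-area table)
--     rows = []
--     for y in range(300):
--         acc = 0
--         pref = [0]
--         for x in range(300):
--             acc += power_level(x, y, serial_number)
--             pref.append(acc)
--         rows.append([hi - lo for lo, hi in zip(pref[1:301 - size], pref[size + 1:])])
--     # vertical prefix of the horizontal sums, elementwise
--     vpref = [[0] * width]
--     for row in rows:
--         vpref.append([a + b for a, b in zip(vpref[-1], row)])
--     flat = [hi - lo
--             for i0 in range(1, width + 1)
--             for lo, hi in zip(vpref[i0], vpref[i0 + size])]
--     best = max(flat)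
--     k = flat.index(best)
--     i, j = divmod(k, width)
--     return (j + 1, i + 1, best)
-- ===== Notes on version B (the rewrite author's own statement) =====
-- stated objective: alternative
-- what changed: A builds an in-place 2D summed-area table and picks the best window by inclusion-exclusion plus a max-of-row-maxes/filter/index search; B never builds a 2D prefix table: it computes per-row 1D prefix sums, horizontal window sums by zipping shifted slices, an elementwise vertical prefix, and selects the winner with max/index on the flattened table plus divmod.
import Mathlib
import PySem

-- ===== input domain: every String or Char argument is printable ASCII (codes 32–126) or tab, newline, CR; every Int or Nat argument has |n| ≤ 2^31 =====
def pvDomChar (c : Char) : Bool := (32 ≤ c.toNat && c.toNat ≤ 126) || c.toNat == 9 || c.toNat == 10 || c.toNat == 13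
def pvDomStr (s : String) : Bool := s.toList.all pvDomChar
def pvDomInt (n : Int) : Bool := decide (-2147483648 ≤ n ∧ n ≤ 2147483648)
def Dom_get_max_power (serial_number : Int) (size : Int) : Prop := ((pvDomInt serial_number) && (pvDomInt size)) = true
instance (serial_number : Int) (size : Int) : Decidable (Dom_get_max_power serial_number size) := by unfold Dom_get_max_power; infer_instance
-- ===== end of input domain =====

-- B replaces A's in-place 2D summed-area table and two-stage max/filter/index selection by per-row 1D
-- prefix sums, an elementwise vertical prefix, and a flatten+max+index+divmod argmax (objective: alternative).

-- ===== PORT A =====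
-- power_level: Python's floor(v/100) uses float division; for |serial| ≤ 2^31 and 0 ≤ x,y < 300 the
-- quotient is exact in double precision, so it equals integer floor division (PySem.Int.floordiv).
def powerLevel (x y serial_number : Int) : Int :=
  PySem.Int.mod (PySem.Int.floordiv (((x + 10) * y + serial_number) * (x + 10)) 100) 10 - 5

-- grid[y][x] (a 2D read; indices are in range on every executed read/write, defaults never used)
def gget (g : List (List Int)) (y x : Int) : Int :=
  PySem.List.pyGetD (PySem.List.pyGetD g y []) x 0

-- grid[y][x] = v
def gset (g : List (List Int)) (y x : Int) (v : Int) : List (List Int) :=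
  PySem.List.pySetD g y (PySem.List.pySetD (PySem.List.pyGetD g y []) x v)

-- max(l) for a list of ints (Python raises on []; the default is never used under Pre_)
def pyMaxI (l : List Int) : Int := (PySem.List.max? l (fun v => v)).getD 0

def get_max_power (serial_number : Int) (size : Int) : Int × Int × Int :=
  let grid0 : List (List Int) :=
    (PySem.List.pyRange 0 300 1).map (fun y =>
      (PySem.List.pyRange 0 300 1).map (fun x => powerLevel x y serial_number))
  let grid : List (List Int) :=
    (PySem.List.pyRange 0 300 1).foldl (fun g y =>
      (PySem.List.pyRange 0 300 1).foldl (fun g x =>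
        gset g y x (gget g y x + (if 0 < y then gget g (y - 1) x else 0)
          + (if 0 < x then gget g y (x - 1) else 0)
          - (if 0 < x ∧ 0 < y then gget g (y - 1) (x - 1) else 0))) g) grid0
  if size = 300 then (0, 0, 0)
  else
    let grid2 : List (List Int) :=
      (PySem.List.pyRange size 300 1).map (fun y =>
        (PySem.List.pyRange size 300 1).map (fun x =>
          gget grid y x - gget grid (y - size) x - gget grid y (x - size)
            + gget grid (y - size) (x - size)))
    let maxPower := pyMaxI (grid2.map (fun r => pyMaxI r))
    let y : Int := ((PySem.List.index? grid2 ((grid2.filter (fun r => r.contains maxPower)).headD [])).getD 0 : Nat)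
    let x : Int := ((PySem.List.index? (PySem.List.pyGetD grid2 y []) maxPower).getD 0 : Nat)
    (x + 1, y + 1, maxPower)

-- ===== PORT B =====
def get_max_power_alt (serial_number : Int) (size : Int) : Int × Int × Int :=
  if size = 300 then (0, 0, 0)
  else
    let width : Int := 300 - size
    let rows : List (List Int) :=
      (PySem.List.pyRange 0 300 1).foldl (fun rows y =>
        let pref : Int × List Int :=
          (PySem.List.pyRange 0 300 1).foldl (fun st x =>
            let acc := st.1 + powerLevel x y serial_number
            (acc, st.2 ++ [acc])) (0, [0])
        rows ++ [((PySem.List.slice pref.2 (some 1) (some (301 - size))).zip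
                   (PySem.List.slice pref.2 (some (size + 1)) none)).map (fun p => p.2 - p.1)]) []
    let vpref : List (List Int) :=
      rows.foldl (fun vp row =>
        vp ++ [((PySem.List.pyGetD vp (-1) []).zip row).map (fun p => p.1 + p.2)])
        [List.replicate width.toNat 0]
    let flat : List Int :=
      (PySem.List.pyRange 1 (width + 1) 1).flatMap (fun i0 =>
        ((PySem.List.pyGetD vpref i0 []).zip (PySem.List.pyGetD vpref (i0 + size) [])).map
          (fun p => p.2 - p.1))
    let best := pyMaxI flat
    let k : Int := ((PySem.List.index? flat best).getD 0 : Nat)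
    let ij := (PySem.Int.divmod? k width).getD (0, 0)
    (ij.2 + 1, ij.1 + 1, best)

-- ===== PRECONDITION & SPEC =====
-- Pre_ excludes exactly the sizes on which A raises (IndexError for size < 0, ValueError from max([])
-- for size > 300); A returns normally for every 0 ≤ size ≤ 300 and any serial number.
def Pre_get_max_power (serial_number : Int) (size : Int) : Prop := 0 ≤ size ∧ size ≤ 300
instance (serial_number : Int) (size : Int) : Decidable (Pre_get_max_power serial_number size) := by
  unfold Pre_get_max_power; infer_instance

def pvWitness_get_max_power : Int × Int := (18, 3)

def Spec_get_max_power (serial_number : Int) (size : Int) (out : Int × Int × Int) : Prop := out = get_max_power_alt serial_number size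
instance (serial_number : Int) (size : Int) (out : Int × Int × Int) : Decidable (Spec_get_max_power serial_number size out) := by unfold Spec_get_max_power; infer_instance

-- ===== CLAIM (what is proved, stated in full; the proofs are below) =====
def Claim_equal_get_max_power : Prop := ∀ (serial_number : Int) (size : Int), Dom_get_max_power serial_number size → Pre_get_max_power serial_number size → Spec_get_max_power serial_number size (get_max_power serial_number size)

-- ===== LEMMAS AND PROOFS =====

-- ---------- proof-side spec functions ----------

-- running row prefix: cp c y x = sum of powerLevel over columns j < x in row y
def cp (c : Int) (y x : Nat) : Int := ∑ j ∈ Finset.range x, powerLevel (j : Int) (y : Int) c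

-- exclusive 2D prefix sum
def Tsum (c : Int) (y x : Nat) : Int := ∑ i ∈ Finset.range y, cp c i x

-- inclusive 2D prefix sum (what A's summed-area table holds)
def Ssat (c : Int) (y x : Nat) : Int := Tsum c (y + 1) (x + 1)

-- the size×size window sum with top-left (row i0, col j0), 0-based
def Wwin (c : Int) (s i0 j0 : Nat) : Int := ∑ i ∈ Finset.Ico i0 (i0 + s), (cp c i (j0 + s) - cp c i j0)

-- the table of window sums both programs select from
def Wtab (c : Int) (s : Nat) : List (List Int) :=
  (List.range (300 - s)).map (fun yy => (List.range (300 - s)).map (fun xx => Wwin c s (yy + 1) (xx + 1)))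

-- A's grid midway through the in-place pass: rows < Y (and row Y left of X) hold Ssat, the rest raw
def mkG (c : Int) (Y X : Nat) : List (List Int) :=
  (List.range 300).map (fun i => (List.range 300).map (fun j =>
    if i < Y ∨ (i = Y ∧ j < X) then Ssat c i j else powerLevel (j : Int) (i : Int) c))

-- A's selection tail (exactly the tail of get_max_power)
def Asel (table : List (List Int)) : Int × Int × Int :=
  let maxPower := pyMaxI (table.map (fun r => pyMaxI r))
  let y : Int := ((PySem.List.index? table ((table.filter (fun r => r.contains maxPower)).headD [])).getD 0 : Nat)
  let x : Int := ((PySem.List.index? (PySem.List.pyGetD table y []) maxPower).getD 0 : Nat)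
  (x + 1, y + 1, maxPower)

-- B's selection tail (exactly the tail of get_max_power_alt)
def Bsel (flat : List Int) (width : Int) : Int × Int × Int :=
  let best := pyMaxI flat
  let k : Int := ((PySem.List.index? flat best).getD 0 : Nat)
  let ij := (PySem.Int.divmod? k width).getD (0, 0)
  (ij.2 + 1, ij.1 + 1, best)

theorem index?_append_of_not_mem {α : Type} [BEq α] [LawfulBEq α] {l : List α} (t : List α) {v : α}
    (h : v ∉ l) : PySem.List.index? (l ++ t) v = (PySem.List.index? t v).map (· + l.length) := by
  induction l with
  | nil => simp [Option.map_id']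
  | cons a l ih =>
    have ha : a ≠ v := by rintro rfl; exact h (List.mem_cons_self)
    rw [List.cons_append, PySem.List.index?_cons_of_ne _ ha,
      ih (by intro hv; exact h (List.mem_cons_of_mem _ hv))]
    cases PySem.List.index? t v
    · simp
    · simp; omega

set_option maxRecDepth 4096 in
theorem pyRange_zero_cast : PySem.List.pyRange 0 300 1 = (List.range 300).map (fun (k : Nat) => (k : Int)) := by
  decide

theorem set_map_range {β : Type} (f g : Nat → β) (n i : Nat) (v : β)
    (hv : g i = v) (hj : ∀ j, j < n → j ≠ i → f j = g j) :
    ((List.range n).map f).set i v = (List.range n).map g := by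
  apply List.ext_getElem
  · simp
  intro k hk1 hk2
  simp only [List.length_set, List.length_map, List.length_range] at hk1 hk2
  rw [List.getElem_set]
  by_cases hk : i = k
  · subst hk
    rw [if_pos rfl]
    simp only [List.getElem_map, List.getElem_range]
    exact hv.symm
  · rw [if_neg hk]
    simp only [List.getElem_map, List.getElem_range]
    exact hj k hk2 (fun hh => hk hh.symm)

theorem gget_mkG (c : Int) (Y X a b : Nat) (ha : a < 300) (hb : b < 300) :
    gget (mkG c Y X) (a : Int) (b : Int)
      = if a < Y ∨ (a = Y ∧ b < X) then Ssat c a b else powerLevel (b : Int) (a : Int) c := by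
  unfold gget mkG
  rw [PySem.List.pyGetD_natCast, PySem.List.pyGetD_natCast,
    PySem.List.getD_map_range _ _ _ _ ha, PySem.List.getD_map_range _ _ _ _ hb]

theorem mkG_congr (c : Int) (Y X Y' X' : Nat)
    (h : ∀ i j, i < 300 → j < 300 → ((i < Y ∨ (i = Y ∧ j < X)) ↔ (i < Y' ∨ (i = Y' ∧ j < X')))) :
    mkG c Y X = mkG c Y' X' := by
  unfold mkG
  apply List.map_congr_left
  intro i hi
  apply List.map_congr_left
  intro j hj
  simp only [List.mem_range] at hi hj
  rw [if_congr (h i j hi hj) rfl rfl]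

theorem gset_mkG (c : Int) (Y X : Nat) (hY : Y < 300) (hX : X < 300) :
    gset (mkG c Y X) (Y : Int) (X : Int) (Ssat c Y X) = mkG c Y (X + 1) := by
  unfold gset
  simp only [PySem.List.pyGetD_natCast, PySem.List.pySetD_natCast]
  unfold mkG
  rw [PySem.List.getD_map_range _ _ _ _ hY]
  have hrow : ((List.range 300).map (fun j => if Y < Y ∨ (Y = Y ∧ j < X) then Ssat c Y j else powerLevel (j : Int) (Y : Int) c)).set X (Ssat c Y X)
      = (List.range 300).map (fun j => if Y < Y ∨ (Y = Y ∧ j < X + 1) then Ssat c Y j else powerLevel (j : Int) (Y : Int) c) := by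
    apply set_map_range
    · have h2 : (Y < Y ∨ (Y = Y ∧ X < X + 1)) := by omega
      rw [if_pos h2]
    · intro j hj hjX
      split_ifs <;> first | rfl | omega
  rw [hrow]
  apply set_map_range
  · rfl
  · intro i hi hiY
    apply List.map_congr_left
    intro j hj
    split_ifs <;> first | rfl | omega
theorem Tsum_succ (c : Int) (y x : Nat) : Tsum c (y + 1) x = Tsum c y x + cp c y x :=
  Finset.sum_range_succ _ _

theorem cp_succ (c : Int) (y x : Nat) : cp c y (x + 1) = cp c y x + powerLevel (x : Int) (y : Int) c :=
  Finset.sum_range_succ _ _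

theorem Ssat_rec (c : Int) (Y X : Nat) :
    Ssat c Y X = powerLevel (X : Int) (Y : Int) c
      + (if 0 < Y then Ssat c (Y - 1) X else 0)
      + (if 0 < X then Ssat c Y (X - 1) else 0)
      - (if 0 < X ∧ 0 < Y then Ssat c (Y - 1) (X - 1) else 0) := by
  rcases Nat.eq_zero_or_pos Y with hY | hY <;> rcases Nat.eq_zero_or_pos X with hX | hX
  · subst hY; subst hX
    simp [Ssat, Tsum, cp]
  · subst hY
    have e2 : X - 1 + 1 = X := by omega
    rw [if_neg (by omega), if_pos hX, if_neg (by omega)]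
    simp only [Ssat, Tsum, Nat.zero_add, Finset.sum_range_one, e2]
    rw [cp_succ]
    push_cast
    ring
  · subst hX
    have e1 : Y - 1 + 1 = Y := by omega
    rw [if_pos hY, if_neg (by omega), if_neg (by omega)]
    simp only [Ssat, e1, Tsum_succ]
    have hcp : cp c Y 1 = powerLevel (0 : Int) (Y : Int) c := by
      rw [show (1 : Nat) = 0 + 1 from rfl, cp_succ]
      simp [cp]
    rw [hcp]
    push_cast
    ring
  · have e1 : Y - 1 + 1 = Y := by omega
    have e2 : X - 1 + 1 = X := by omega
    rw [if_pos hY, if_pos hX, if_pos ⟨hX, hY⟩]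
    simp only [Ssat, e1, e2, Tsum_succ, cp_succ]
    ring

theorem step_eval (c : Int) (Y X : Nat) (hY : Y < 300) (hX : X < 300) :
    gset (mkG c Y X) (Y : Int) (X : Int)
      (gget (mkG c Y X) (Y : Int) (X : Int)
        + (if 0 < (Y : Int) then gget (mkG c Y X) ((Y : Int) - 1) (X : Int) else 0)
        + (if 0 < (X : Int) then gget (mkG c Y X) (Y : Int) ((X : Int) - 1) else 0)
        - (if 0 < (X : Int) ∧ 0 < (Y : Int) then gget (mkG c Y X) ((Y : Int) - 1) ((X : Int) - 1) else 0))
      = mkG c Y (X + 1) := by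
  have hgYX : gget (mkG c Y X) (Y : Int) (X : Int) = powerLevel (X : Int) (Y : Int) c := by
    rw [gget_mkG c Y X Y X hY hX, if_neg (by omega)]
  have t1 : (if 0 < (Y : Int) then gget (mkG c Y X) ((Y : Int) - 1) (X : Int) else 0)
      = (if 0 < Y then Ssat c (Y - 1) X else 0) := by
    by_cases hY0 : 0 < Y
    · rw [if_pos (by exact_mod_cast hY0), if_pos hY0,
        show ((Y : Int) - 1) = (((Y - 1 : Nat)) : Int) by omega,
        gget_mkG c Y X (Y - 1) X (by omega) hX, if_pos (Or.inl (by omega))]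
    · rw [if_neg (by simpa using hY0), if_neg hY0]
  have t2 : (if 0 < (X : Int) then gget (mkG c Y X) (Y : Int) ((X : Int) - 1) else 0)
      = (if 0 < X then Ssat c Y (X - 1) else 0) := by
    by_cases hX0 : 0 < X
    · rw [if_pos (by exact_mod_cast hX0), if_pos hX0,
        show ((X : Int) - 1) = (((X - 1 : Nat)) : Int) by omega,
        gget_mkG c Y X Y (X - 1) hY (by omega), if_pos (Or.inr ⟨rfl, by omega⟩)]
    · rw [if_neg (by simpa using hX0), if_neg hX0]
  have t3 : (if 0 < (X : Int) ∧ 0 < (Y : Int) then gget (mkG c Y X) ((Y : Int) - 1) ((X : Int) - 1) else 0)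
      = (if 0 < X ∧ 0 < Y then Ssat c (Y - 1) (X - 1) else 0) := by
    by_cases hXY : 0 < X ∧ 0 < Y
    · rw [if_pos (by constructor <;> [exact_mod_cast hXY.1; exact_mod_cast hXY.2]), if_pos hXY,
        show ((Y : Int) - 1) = (((Y - 1 : Nat)) : Int) by omega,
        show ((X : Int) - 1) = (((X - 1 : Nat)) : Int) by omega,
        gget_mkG c Y X (Y - 1) (X - 1) (by omega) (by omega), if_pos (Or.inl (by omega))]
    · rw [if_neg (by simp only [not_and_or] at hXY ⊢; rcases hXY with h | h <;> [left; right] <;> simpa using h),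
        if_neg hXY]
  rw [hgYX, t1, t2, t3, ← Ssat_rec c Y X, gset_mkG c Y X hY hX]

theorem inner_fold (c : Int) (Y : Nat) (hY : Y < 300) :
    ∀ (m X : Nat), X + m = 300 →
    List.foldl (fun g (x : Int) =>
        gset g (Y : Int) x (gget g (Y : Int) x + (if 0 < (Y : Int) then gget g ((Y : Int) - 1) x else 0)
          + (if 0 < x then gget g (Y : Int) (x - 1) else 0)
          - (if 0 < x ∧ 0 < (Y : Int) then gget g ((Y : Int) - 1) (x - 1) else 0)))
      (mkG c Y X) ((List.range' X m).map (fun (k : Nat) => (k : Int)))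
      = mkG c (Y + 1) 0 := by
  intro m
  induction m with
  | zero =>
    intro X h
    have : X = 300 := by omega
    subst this
    simp only [List.range'_zero, List.map_nil, List.foldl_nil]
    apply mkG_congr
    intro i j hi hj
    omega
  | succ m ih =>
    intro X h
    rw [List.range'_succ]
    simp only [List.map_cons, List.foldl_cons]
    rw [step_eval c Y X hY (by omega)]
    exact ih (X + 1) (by omega)

set_option maxRecDepth 8192 in
theorem gridA_eq (c : Int) :
    (PySem.List.pyRange 0 300 1).foldl (fun g y =>
      (PySem.List.pyRange 0 300 1).foldl (fun g x =>
        gset g y x (gget g y x + (if 0 < y then gget g (y - 1) x else 0)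
          + (if 0 < x then gget g y (x - 1) else 0)
          - (if 0 < x ∧ 0 < y then gget g (y - 1) (x - 1) else 0))) g)
      ((PySem.List.pyRange 0 300 1).map (fun y =>
        (PySem.List.pyRange 0 300 1).map (fun x => powerLevel x y c)))
      = mkG c 300 0 := by
  rw [pyRange_zero_cast]
  rw [List.foldl_map]
  have hgrid0 : ((List.range 300).map (fun (k : Nat) => (k : Int))).map (fun y =>
      ((List.range 300).map (fun (k : Nat) => (k : Int))).map (fun x => powerLevel x y c)) = mkG c 0 0 := by
    rw [List.map_map]
    unfold mkG
    apply List.map_congr_left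
    intro i _
    simp only [Function.comp_apply, List.map_map]
    apply List.map_congr_left
    intro j _
    simp only [Function.comp_apply]
    rw [if_neg (by omega)]
  rw [hgrid0]
  have main : ∀ (m Y : Nat), Y + m = 300 →
      List.foldl (fun g (y : Nat) =>
        List.foldl (fun g (x : Int) =>
          gset g (y : Int) x (gget g (y : Int) x + (if 0 < (y : Int) then gget g ((y : Int) - 1) x else 0)
            + (if 0 < x then gget g (y : Int) (x - 1) else 0)
            - (if 0 < x ∧ 0 < (y : Int) then gget g ((y : Int) - 1) (x - 1) else 0)))
          g ((List.range 300).map (fun (k : Nat) => (k : Int))))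
        (mkG c Y 0) (List.range' Y m) = mkG c 300 0 := by
    intro m
    induction m with
    | zero =>
      intro Y h
      have : Y = 300 := by omega
      subst this
      simp only [List.range'_zero, List.foldl_nil]
    | succ m ih =>
      intro Y h
      rw [List.range'_succ, List.foldl_cons]
      rw [show List.range 300 = List.range' 0 300 from List.range_eq_range']
      rw [inner_fold c Y (by omega) 300 0 (by omega)]
      exact ih (Y + 1) (by omega)
  rw [show List.range 300 = List.range' 0 300 from List.range_eq_range'] 
  exact main 300 0 rfl
theorem Sdiff_eq_W (c : Int) (s k k2 : Nat) :
    Ssat c (s + k) (s + k2) - Ssat c k (s + k2) - Ssat c (s + k) k2 + Ssat c k k2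
      = Wwin c s (k + 1) (k2 + 1) := by
  have hA : ∀ (x : Nat), Tsum c (s + k + 1) x - Tsum c (k + 1) x
      = ∑ i ∈ Finset.Ico (k + 1) ((k + 1) + s), cp c i x := by
    intro x
    rw [show (k + 1) + s = s + k + 1 by omega,
      Finset.sum_Ico_eq_sub (fun i => cp c i x) (show k + 1 ≤ s + k + 1 by omega)]
    rfl
  unfold Wwin
  rw [Finset.sum_sub_distrib]
  have e1 : Ssat c (s + k) (s + k2) = Tsum c (s + k + 1) ((k2 + 1) + s) := by
    unfold Ssat
    congr 1
    omega
  have e2 : Ssat c k (s + k2) = Tsum c (k + 1) ((k2 + 1) + s) := by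
    unfold Ssat
    congr 1
    omega
  have e3 : Ssat c (s + k) k2 = Tsum c (s + k + 1) (k2 + 1) := rfl
  have e4 : Ssat c k k2 = Tsum c (k + 1) (k2 + 1) := rfl
  rw [e1, e2, e3, e4]
  rw [← hA ((k2 + 1) + s), ← hA (k2 + 1)]
  ring

theorem grid2_eq (c size : Int) (h0 : 0 ≤ size) (h1 : size < 300) :
    (PySem.List.pyRange size 300 1).map (fun y =>
      (PySem.List.pyRange size 300 1).map (fun x =>
        gget (mkG c 300 0) y x - gget (mkG c 300 0) (y - size) x - gget (mkG c 300 0) y (x - size)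
          + gget (mkG c 300 0) (y - size) (x - size)))
      = Wtab c size.toNat := by
  rw [PySem.List.pyRange_one]
  rw [show ((300 : Int) - size).toNat = 300 - size.toNat by omega]
  unfold Wtab
  simp only [List.map_map]
  apply List.map_congr_left
  intro k hk
  simp only [List.mem_range] at hk
  simp only [Function.comp_apply]
  apply List.map_congr_left
  intro k2 hk2
  simp only [List.mem_range] at hk2
  simp only [Function.comp_apply]
  have ey : size + (k : Int) = ((size.toNat + k : Nat) : Int) := by omega
  have ex : size + (k2 : Int) = ((size.toNat + k2 : Nat) : Int) := by omega
  have ey' : size + (k : Int) - size = ((k : Nat) : Int) := by omega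
  have ex' : size + (k2 : Int) - size = ((k2 : Nat) : Int) := by omega
  rw [ey, ex] 
  rw [show ((size.toNat + k : Nat) : Int) - size = ((k : Nat) : Int) by omega,
    show ((size.toNat + k2 : Nat) : Int) - size = ((k2 : Nat) : Int) by omega]
  rw [gget_mkG c 300 0 (size.toNat + k) (size.toNat + k2) (by omega) (by omega),
    gget_mkG c 300 0 k (size.toNat + k2) (by omega) (by omega),
    gget_mkG c 300 0 (size.toNat + k) k2 (by omega) (by omega),
    gget_mkG c 300 0 k k2 (by omega) (by omega)]
  rw [if_pos (Or.inl (by omega)), if_pos (Or.inl (by omega)),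
    if_pos (Or.inl (by omega)), if_pos (Or.inl (by omega))]
  exact Sdiff_eq_W c size.toNat k k2

theorem A_eval (c size : Int) (h0 : 0 ≤ size) (h1 : size < 300) :
    get_max_power c size = Asel (Wtab c size.toNat) := by
  have h300 : ¬ (size = 300) := by omega
  simp only [get_max_power, Asel]
  rw [if_neg h300]
  rw [gridA_eq c, grid2_eq c size h0 h1]
theorem pref_fold (c : Int) (Y : Nat) :
    ∀ (m X : Nat), X + m = 300 →
    List.foldl (fun (st : Int × List Int) (x : Int) =>
        (st.1 + powerLevel x (Y : Int) c, st.2 ++ [st.1 + powerLevel x (Y : Int) c]))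
      (cp c Y X, (List.range (X + 1)).map (fun j => cp c Y j))
      ((List.range' X m).map (fun (k : Nat) => (k : Int)))
      = (cp c Y 300, (List.range 301).map (fun j => cp c Y j)) := by
  intro m
  induction m with
  | zero =>
    intro X h
    have : X = 300 := by omega
    subst this
    simp only [List.range'_zero, List.map_nil, List.foldl_nil]
  | succ m ih =>
    intro X h
    rw [List.range'_succ]
    simp only [List.map_cons, List.foldl_cons]
    have hstep : (cp c Y X + powerLevel (X : Int) (Y : Int) c,
        ((List.range (X + 1)).map (fun j => cp c Y j)) ++ [cp c Y X + powerLevel (X : Int) (Y : Int) c])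
        = (cp c Y (X + 1), (List.range (X + 1 + 1)).map (fun j => cp c Y j)) := by
      rw [← cp_succ]
      rw [List.range_succ (n := X + 1), List.map_append]
      rfl
    rw [hstep]
    exact ih (X + 1) (by omega)

theorem row_eq (c : Int) (size : Int) (Y : Nat) (h0 : 0 ≤ size) (h1 : size < 300) :
    ((PySem.List.slice ((List.range 301).map (fun j => cp c Y j)) (some 1) (some (301 - size))).zip
      (PySem.List.slice ((List.range 301).map (fun j => cp c Y j)) (some (size + 1)) none)).map
        (fun p => p.2 - p.1)
      = (List.range (300 - size.toNat)).map (fun j => cp c Y (j + 1 + size.toNat) - cp c Y (j + 1)) := by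
  rw [PySem.List.slice_toNat _ (by omega) (by omega),
    PySem.List.slice_from _ (by omega)]
  rw [show (1 : Int).toNat = 1 from rfl,
    show ((301 : Int) - size).toNat = 301 - size.toNat by omega,
    show (size + 1).toNat = size.toNat + 1 by omega]
  apply List.ext_getElem
  · simp
    omega
  intro j hj1 hj2
  simp only [List.getElem_map, List.getElem_zip, List.getElem_take, List.getElem_drop,
    List.getElem_range]
  rw [show 1 + j = j + 1 by omega, show size.toNat + 1 + j = j + 1 + size.toNat by omega]
set_option maxRecDepth 8192 in
theorem rows_eq (c : Int) (size : Int) (h0 : 0 ≤ size) (h1 : size < 300) :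
    List.foldl (fun rows (y : Int) =>
        rows ++ [((PySem.List.slice
            (List.foldl (fun (st : Int × List Int) (x : Int) =>
              (st.1 + powerLevel x y c, st.2 ++ [st.1 + powerLevel x y c])) (0, [0])
              (PySem.List.pyRange 0 300 1)).2
            (some 1) (some (301 - size))).zip
          (PySem.List.slice
            (List.foldl (fun (st : Int × List Int) (x : Int) =>
              (st.1 + powerLevel x y c, st.2 ++ [st.1 + powerLevel x y c])) (0, [0])
              (PySem.List.pyRange 0 300 1)).2
            (some (size + 1)) none)).map (fun p => p.2 - p.1)]) []
      (PySem.List.pyRange 0 300 1)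
      = (List.range 300).map (fun y =>
          (List.range (300 - size.toNat)).map (fun j => cp c y (j + 1 + size.toNat) - cp c y (j + 1))) := by
  rw [pyRange_zero_cast]
  rw [PySem.List.foldl_append_singleton_eq_map]
  rw [List.map_map, List.nil_append]
  apply List.map_congr_left
  intro Y hY
  simp only [List.mem_range] at hY
  simp only [Function.comp_apply]
  have hpref : List.foldl (fun (st : Int × List Int) (x : Int) =>
      (st.1 + powerLevel x (Y : Int) c, st.2 ++ [st.1 + powerLevel x (Y : Int) c])) (0, [0])
      ((List.range 300).map (fun (k : Nat) => (k : Int)))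
      = (cp c Y 300, (List.range 301).map (fun j => cp c Y j)) := by
    rw [show List.range 300 = List.range' 0 300 from List.range_eq_range']
    have hbase : ((0 : Int), ([0] : List Int)) = (cp c Y 0, (List.range (0 + 1)).map (fun j => cp c Y j)) := rfl
    rw [hbase]
    exact pref_fold c Y 300 0 rfl
  rw [hpref]
  exact row_eq c size Y h0 h1

-- the elementwise vertical prefix table
def VP (c : Int) (s i : Nat) : List Int :=
  (List.range (300 - s)).map (fun j => ∑ t ∈ Finset.range i, (cp c t (j + 1 + s) - cp c t (j + 1)))

set_option maxRecDepth 8192 in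
theorem vpref_eq (c : Int) (size : Int) (h0 : 0 ≤ size) (h1 : size < 300) :
    ((List.range 300).map (fun y =>
        (List.range (300 - size.toNat)).map (fun j => cp c y (j + 1 + size.toNat) - cp c y (j + 1)))).foldl
      (fun vp row => vp ++ [((PySem.List.pyGetD vp (-1) []).zip row).map (fun p => p.1 + p.2)])
      [List.replicate (300 - size).toNat 0]
      = (List.range 301).map (fun i => VP c size.toNat i) := by
  rw [List.foldl_map]
  have hbase : [List.replicate ((300 : Int) - size).toNat (0 : Int)] = (List.range 1).map (fun i => VP c size.toNat i) := by
    simp only [List.range_one, List.map_cons, List.map_nil]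
    congr 1
    rw [show ((300 : Int) - size).toNat = 300 - size.toNat by omega]
    apply List.ext_getElem
    · simp [VP]
    intro j hj1 hj2
    simp [VP]
  rw [hbase]
  rw [show List.range 300 = List.range' 0 300 from List.range_eq_range']
  have main : ∀ (m Y : Nat), Y + m = 300 →
      List.foldl (fun vp (y : Nat) =>
        vp ++ [((PySem.List.pyGetD vp (-1) []).zip
          ((List.range (300 - size.toNat)).map (fun j => cp c y (j + 1 + size.toNat) - cp c y (j + 1)))).map
          (fun p => p.1 + p.2)])
        ((List.range (Y + 1)).map (fun i => VP c size.toNat i)) (List.range' Y m)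
      = (List.range 301).map (fun i => VP c size.toNat i) := by
    intro m
    induction m with
    | zero =>
      intro Y h
      have : Y = 300 := by omega
      subst this
      simp only [List.range'_zero, List.foldl_nil]
    | succ m ih =>
      intro Y h
      rw [List.range'_succ, List.foldl_cons]
      have hlast : PySem.List.pyGetD ((List.range (Y + 1)).map (fun i => VP c size.toNat i)) (-1) []
          = VP c size.toNat Y := by
        rw [List.range_succ, List.map_append]
        exact PySem.List.pyGetD_neg_one_append_singleton _ _ _
      rw [hlast]
      have hnew : ((VP c size.toNat Y).zip
          ((List.range (300 - size.toNat)).map (fun j => cp c (Y : Nat) (j + 1 + size.toNat) - cp c Y (j + 1)))).map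
          (fun p => p.1 + p.2) = VP c size.toNat (Y + 1) := by
        apply List.ext_getElem
        · simp [VP]
        intro j hj1 hj2
        simp only [List.getElem_map, List.getElem_zip, VP, List.getElem_range]
        rw [Finset.sum_range_succ]
      rw [hnew]
      have hgrow : ((List.range (Y + 1)).map (fun i => VP c size.toNat i)) ++ [VP c size.toNat (Y + 1)]
          = (List.range (Y + 1 + 1)).map (fun i => VP c size.toNat i) := by
        rw [List.range_succ (n := Y + 1), List.map_append]
        rfl
      rw [hgrow]
      exact ih (Y + 1) (by omega)
  exact main 300 0 rfl
set_option maxRecDepth 8192 in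
theorem flat_eq (c : Int) (size : Int) (h0 : 0 ≤ size) (h1 : size < 300) :
    (PySem.List.pyRange 1 ((300 - size) + 1) 1).flatMap (fun i0 =>
        ((PySem.List.pyGetD ((List.range 301).map (fun i => VP c size.toNat i)) i0 []).zip
          (PySem.List.pyGetD ((List.range 301).map (fun i => VP c size.toNat i)) (i0 + size) [])).map
          (fun p => p.2 - p.1))
      = (Wtab c size.toNat).flatten := by
  rw [PySem.List.pyRange_one]
  rw [show ((300 : Int) - size + 1 - 1).toNat = 300 - size.toNat by omega]
  unfold Wtab
  rw [List.flatMap_def, List.map_map]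
  congr 1
  apply List.map_congr_left
  intro k hk
  simp only [List.mem_range] at hk
  simp only [Function.comp_apply]
  have e1 : (1 : Int) + (k : Int) = ((1 + k : Nat) : Int) := by omega
  rw [e1]
  rw [show ((1 + k : Nat) : Int) + size = ((1 + k + size.toNat : Nat) : Int) by omega]
  rw [PySem.List.pyGetD_natCast, PySem.List.pyGetD_natCast,
    PySem.List.getD_map_range _ _ _ _ (by omega), PySem.List.getD_map_range _ _ _ _ (by omega)]
  apply List.ext_getElem
  · simp [VP]
  intro j hj1 hj2
  simp only [List.getElem_map, List.getElem_zip, VP, List.getElem_range]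
  unfold Wwin
  rw [Finset.sum_Ico_eq_sub (fun t => cp c t (j + 1 + size.toNat) - cp c t (j + 1))
    (show k + 1 ≤ k + 1 + size.toNat by omega)]
  rw [show k + 1 + size.toNat = 1 + k + size.toNat by omega, show k + 1 = 1 + k by omega]

set_option maxRecDepth 8192 in
theorem B_eval (c size : Int) (h0 : 0 ≤ size) (h1 : size < 300) :
    get_max_power_alt c size = Bsel ((Wtab c size.toNat).flatten) (300 - size) := by
  have h300 : ¬ (size = 300) := by omega
  simp only [get_max_power_alt, Bsel]
  rw [if_neg h300]
  rw [rows_eq c size h0 h1, vpref_eq c size h0 h1, flat_eq c size h0 h1]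
theorem exists_first_row {v : Int} {table : List (List Int)} (h : v ∈ table.flatten) :
    ∃ pre r suf, table = pre ++ r :: suf ∧ v ∈ r ∧ ∀ r' ∈ pre, v ∉ r' := by
  induction table with
  | nil => simp at h
  | cons t ts ih =>
    by_cases hv : v ∈ t
    · exact ⟨[], t, ts, rfl, hv, by simp⟩
    · have h' : v ∈ ts.flatten := by
        obtain ⟨l, hl, hvl⟩ := List.mem_flatten.mp h
        rcases List.mem_cons.mp hl with rfl | hl
        · exact absurd hvl hv
        · exact List.mem_flatten.mpr ⟨l, hl, hvl⟩
      obtain ⟨pre, r, suf, heq, hvr, hpre⟩ := ih h'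
      refine ⟨t :: pre, r, suf, by rw [heq]; rfl, hvr, ?_⟩
      intro r' hr'
      rcases List.mem_cons.mp hr' with rfl | hr'
      · exact hv
      · exact hpre r' hr'

theorem max_flatten_eq (table : List (List Int)) (htne : table ≠ [])
    (hrne : ∀ r ∈ table, r ≠ []) :
    pyMaxI table.flatten = pyMaxI (table.map (fun r => pyMaxI r)) := by
  obtain ⟨m0, hm0⟩ : ∃ m0, PySem.List.max? (table.map (fun r => pyMaxI r)) (fun v => v) = some m0 := by
    cases hc : PySem.List.max? (table.map (fun r => pyMaxI r)) (fun v => v) with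
    | none => exact absurd (by simpa using (PySem.List.max?_eq_none_iff _ _).mp hc) htne
    | some m => exact ⟨m, rfl⟩
  have hM : pyMaxI (table.map (fun r => pyMaxI r)) = m0 := by rw [pyMaxI, hm0]; rfl
  have hMmem : m0 ∈ table.flatten := by
    obtain ⟨r0, hr0mem, hr0⟩ := List.mem_map.mp (PySem.List.max?_mem hm0)
    obtain ⟨mr, hmr⟩ : ∃ mr, PySem.List.max? r0 (fun v => v) = some mr := by
      cases hc : PySem.List.max? r0 (fun v => v) with
      | none => exact absurd ((PySem.List.max?_eq_none_iff _ _).mp hc) (hrne r0 hr0mem)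
      | some m => exact ⟨m, rfl⟩
    have : pyMaxI r0 = mr := by rw [pyMaxI, hmr]; rfl
    rw [← hr0, this]
    exact List.mem_flatten.mpr ⟨r0, hr0mem, PySem.List.max?_mem hmr⟩
  have hMmax : ∀ v ∈ table.flatten, v ≤ m0 := by
    intro v hv
    obtain ⟨r1, hr1mem, hvr1⟩ := List.mem_flatten.mp hv
    obtain ⟨mr, hmr⟩ : ∃ mr, PySem.List.max? r1 (fun v => v) = some mr := by
      cases hc : PySem.List.max? r1 (fun v => v) with
      | none => exact absurd ((PySem.List.max?_eq_none_iff _ _).mp hc) (hrne r1 hr1mem)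
      | some m => exact ⟨m, rfl⟩
    have h1 : v ≤ mr := PySem.List.max?_isMax hmr v hvr1
    have h2 : pyMaxI r1 = mr := by rw [pyMaxI, hmr]; rfl
    have h3 : pyMaxI r1 ≤ m0 :=
      PySem.List.max?_isMax hm0 (pyMaxI r1) (List.mem_map.mpr ⟨r1, hr1mem, rfl⟩)
    omega
  obtain ⟨b0, hb0⟩ : ∃ b0, PySem.List.max? table.flatten (fun v => v) = some b0 := by
    cases hc : PySem.List.max? table.flatten (fun v => v) with
    | none => exact absurd ((PySem.List.max?_eq_none_iff _ _).mp hc) (List.ne_nil_of_mem hMmem)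
    | some m => exact ⟨m, rfl⟩
  have hB : pyMaxI table.flatten = b0 := by rw [pyMaxI, hb0]; rfl
  have : b0 = m0 := le_antisymm (hMmax b0 (PySem.List.max?_mem hb0)) (PySem.List.max?_isMax hb0 m0 hMmem)
  rw [hB, hM, this]

theorem master_sel (table : List (List Int)) (w : Nat) (hw : 0 < w) (hlen : table.length = w)
    (hrows : ∀ r ∈ table, r.length = w) :
    Asel table = Bsel table.flatten (w : Int) := by
  have htne : table ≠ [] := by intro h; rw [h] at hlen; simp at hlen; omega
  have hrne : ∀ r ∈ table, r ≠ [] := by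
    intro r hr h
    have := hrows r hr
    rw [h] at this
    simp at this
    omega
  have hmax := max_flatten_eq table htne hrne
  obtain ⟨m0, hm0⟩ : ∃ m0, PySem.List.max? (table.map (fun r => pyMaxI r)) (fun v => v) = some m0 := by
    cases hc : PySem.List.max? (table.map (fun r => pyMaxI r)) (fun v => v) with
    | none => exact absurd (by simpa using (PySem.List.max?_eq_none_iff _ _).mp hc) htne
    | some m => exact ⟨m, rfl⟩
  have hM : pyMaxI (table.map (fun r => pyMaxI r)) = m0 := by rw [pyMaxI, hm0]; rfl
  have hMmem : m0 ∈ table.flatten := by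
    rw [← hM, ← hmax, pyMaxI]
    obtain ⟨b0, hb0⟩ : ∃ b0, PySem.List.max? table.flatten (fun v => v) = some b0 := by
      cases hc : PySem.List.max? table.flatten (fun v => v) with
      | none =>
        exfalso
        have := (PySem.List.max?_eq_none_iff _ _).mp hc
        rcases table with _ | ⟨t, ts⟩
        · exact htne rfl
        · have htn : t ≠ [] := hrne t (by simp)
          rcases t with _ | ⟨a, t'⟩
          · exact htn rfl
          · simp [List.flatten_cons] at this
      | some m => exact ⟨m, rfl⟩
    rw [hb0]
    exact PySem.List.max?_mem hb0
  obtain ⟨pre, r, suf, heq, hvr, hpre⟩ := exists_first_row hMmem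
  have hrmem : r ∈ table := by rw [heq]; exact List.mem_append.mpr (Or.inr (List.mem_cons_self))
  have hrw : r.length = w := hrows r hrmem
  -- A's filter-head is r
  have hfilter : (table.filter (fun r' => r'.contains m0)).headD [] = r := by
    rw [heq, List.filter_append]
    have h1 : pre.filter (fun r' => r'.contains m0) = [] := by
      rw [List.filter_eq_nil_iff]
      intro r' hr'
      simpa using hpre r' hr'
    rw [h1, List.nil_append, List.filter_cons, if_pos (by simpa using hvr)]
    rfl
  -- A's y = pre.length
  have hy : PySem.List.index? table r = some pre.length := by
    rw [PySem.List.index?_eq_some_iff]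
    exact ⟨pre, suf, heq, rfl, fun hmem => (hpre r hmem) hvr⟩
  -- table[pre.length] is r
  have hgetd : PySem.List.pyGetD table ((pre.length : Nat) : Int) [] = r := by
    rw [PySem.List.pyGetD_natCast, heq, List.getD_eq_getElem?_getD,
      List.getElem?_append_right (Nat.le_refl _)]
    simp
  -- x within row r
  obtain ⟨x, hx⟩ : ∃ x, PySem.List.index? r m0 = some x := by
    cases hc : PySem.List.index? r m0 with
    | none =>
      exfalso
      have := (PySem.List.index?_isSome_iff r m0).mpr hvr
      rw [hc] at this
      simp at this
    | some x => exact ⟨x, rfl⟩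
  obtain ⟨hxlt, hrx, hxfirst⟩ := PySem.List.getElem_of_index?_eq_some hx
  have hxw : x < w := by rw [← hrw]; exact hxlt
  -- first occurrence of m0 in the flattening
  have hnotpre : m0 ∉ pre.flatten := by
    intro hmem
    obtain ⟨r', hr', hm⟩ := List.mem_flatten.mp hmem
    exact hpre r' hr' hm
  have hplen : pre.flatten.length = pre.length * w := by
    rw [List.length_flatten]
    have : pre.map List.length = List.replicate pre.length w := by
      rw [List.eq_replicate_iff]
      refine ⟨by simp, ?_⟩
      intro b hb
      obtain ⟨r', hr', rfl⟩ := List.mem_map.mp hb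
      exact hrows r' (by rw [heq]; exact List.mem_append.mpr (Or.inl hr'))
    rw [this, List.sum_replicate, smul_eq_mul]
  have hkflat : PySem.List.index? table.flatten m0 = some (x + pre.length * w) := by
    rw [heq, List.flatten_append, List.flatten_cons]
    rw [index?_append_of_not_mem _ hnotpre, PySem.List.index?_append_of_mem _ hvr, hx]
    simp [hplen]
  -- B's divmod on the flattened index
  have hdm : PySem.Int.divmod? ((x + pre.length * w : Nat) : Int) ((w : Nat) : Int)
      = some (((pre.length : Nat) : Int), ((x : Nat) : Int)) := by
    have hrw1 : PySem.Int.divmod? ((x + pre.length * w : Nat) : Int) ((w : Nat) : Int)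
        = if ((w : Nat) : Int) = 0 then none
          else some (PySem.Int.floordiv ((x + pre.length * w : Nat) : Int) ((w : Nat) : Int),
            PySem.Int.mod ((x + pre.length * w : Nat) : Int) ((w : Nat) : Int)) := rfl
    rw [hrw1, if_neg (by omega), PySem.Int.floordiv_natCast, PySem.Int.mod_natCast]
    rw [Nat.add_mul_div_right _ _ hw, Nat.div_eq_of_lt hxw,
      Nat.add_mul_mod_self_right, Nat.mod_eq_of_lt hxw]
    simp
  have hbest : pyMaxI table.flatten = m0 := by rw [hmax, hM]
  simp only [Asel, Bsel]
  rw [hM, hfilter, hy]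
  simp only [Option.getD_some]
  rw [hgetd, hx, hbest, hkflat]
  simp only [Option.getD_some]
  rw [hdm]
  simp only [Option.getD_some]
-- ===== VERDICT (by name: the statement is the Claim_ definition above) =====
theorem get_max_power_spec : Claim_equal_get_max_power := by
  intro c size _ hpre
  unfold Spec_get_max_power
  obtain ⟨h0, h1⟩ := hpre
  by_cases h300 : size = 300
  · subst h300
    simp [get_max_power, get_max_power_alt]
  · have hlt : size < 300 := lt_of_le_of_ne h1 h300
    rw [A_eval c size h0 hlt, B_eval c size h0 hlt]
    have hw : 0 < 300 - size.toNat := by omega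
    have hcast : ((300 - size.toNat : Nat) : Int) = 300 - size := by omega
    rw [← hcast]
    exact master_sel _ _ hw (by simp [Wtab]) (by
      intro r hr
      simp only [Wtab, List.mem_map] at hr
      rcases hr with ⟨yy, _, rfl⟩
      simp)
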